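-- pv_equiv track=rewrite | github.com/paiml/depyler | examples/hard_numeric_euler_ode.py | euler_quadratic
-- ===== SOURCE A (Python) =====
-- def euler_quadratic(y0: int, steps: int) -> int:
--     """Euler method for dy/dx = 2*x, y(0)=y0, h=1.
--     Exact: y = x^2 + y0."""
--     y: int = y0
--     x: int = 0
--     i: int = 0
--     while i < steps:
--         y = y + 2 * x
--         x = x + 1
--         i = i + 1
--     return y
-- ===== SOURCE B (Python) =====
-- def euler_quadratic(y0: int, steps: int) -> int:
--     """Closed form: sum of 2*x for x in 0..steps-1 is m*(m-1), m = max(steps, 0)."""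
--     m = steps if steps > 0 else 0
--     return y0 + m * (m - 1)
-- ===== Notes on version B (the rewrite author's own statement) =====
-- stated objective: faster
-- what changed: Replaces the Euler iteration loop by the closed form y0 + m*(m-1) with m = max(steps, 0).
import Mathlib
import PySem

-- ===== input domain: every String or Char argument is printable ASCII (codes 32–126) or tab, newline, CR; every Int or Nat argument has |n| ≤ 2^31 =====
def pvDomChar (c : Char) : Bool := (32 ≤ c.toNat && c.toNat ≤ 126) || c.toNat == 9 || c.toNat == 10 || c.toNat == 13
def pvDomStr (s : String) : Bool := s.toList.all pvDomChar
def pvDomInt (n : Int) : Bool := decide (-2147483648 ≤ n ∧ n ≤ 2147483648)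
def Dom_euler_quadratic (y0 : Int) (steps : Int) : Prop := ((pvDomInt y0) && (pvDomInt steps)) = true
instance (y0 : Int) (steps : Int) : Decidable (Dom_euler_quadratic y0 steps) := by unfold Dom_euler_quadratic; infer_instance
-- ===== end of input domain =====

-- B replaces A's Euler-step loop by the O(1) closed form y0 + m*(m-1), m = max(steps, 0) (measured faster).
-- ===== PORT A =====
-- while i < steps loop: tail recursion over the same state (y, x, i); steps - i decreases
def eulerLoop (steps : Int) (y x i : Int) : Int :=
  if i < steps then eulerLoop steps (y + 2 * x) (x + 1) (i + 1) else y
termination_by (steps - i).toNat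
decreasing_by omega

def euler_quadratic (y0 : Int) (steps : Int) : Int := eulerLoop steps y0 0 0

-- ===== PORT B =====
def euler_quadratic_alt (y0 : Int) (steps : Int) : Int :=
  let m : Int := if steps > 0 then steps else 0
  y0 + m * (m - 1)

-- ===== PRECONDITION & SPEC =====
def Spec_euler_quadratic (y0 : Int) (steps : Int) (out : Int) : Prop := out = euler_quadratic_alt y0 steps
instance (y0 : Int) (steps : Int) (out : Int) : Decidable (Spec_euler_quadratic y0 steps out) := by unfold Spec_euler_quadratic; infer_instance

-- ===== CLAIM (what is proved, stated in full; the proofs are below) =====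
def Claim_equal_euler_quadratic : Prop := ∀ (y0 : Int) (steps : Int), Dom_euler_quadratic y0 steps → Spec_euler_quadratic y0 steps (euler_quadratic y0 steps)

-- ===== LEMMAS AND PROOFS =====

-- loop invariant: closed form of the remaining loop from state (y, x, i) with x = i
theorem eulerLoop_closed (steps y x i : Int) (h : x = i) :
    eulerLoop steps y x i = y + (if steps > i then (steps - i) * (steps - i - 1) + 2 * i * (steps - i) else 0) := by
  unfold eulerLoop
  split_ifs with h1
  · rw [eulerLoop_closed steps (y + 2 * x) (x + 1) (i + 1) (by omega)]
    subst h
    split_ifs with h3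
    · ring
    · have : steps = x + 1 := by omega
      subst this; ring
  · omega
termination_by (steps - i).toNat
decreasing_by omega

-- ===== VERDICT (by name: the statement is the Claim_ definition above) =====
theorem euler_quadratic_spec : Claim_equal_euler_quadratic := by
  intro y0 steps _
  unfold Spec_euler_quadratic euler_quadratic euler_quadratic_alt
  rw [eulerLoop_closed steps y0 0 0 rfl]
  split_ifs with h
  · ring
  · ring
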